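-- pv_equiv track=rewrite | github.com/fls99/pfds | Week2/excercise/01-B/01-B.py | coin_condrum
-- ===== SOURCE A (Python) =====
-- def coin_condrum(limit: int) -> int:
--     current_sum = 0
--     numbers = [i for i in range(limit) if i % 2 != 0 and i % 3 != 0]
--
--     for number in numbers:
--         if current_sum + number >= limit:
--             break
--         current_sum += number
--
--     return current_sum
-- ===== SOURCE B (Python) =====
-- def coin_condrum(limit: int) -> int:
--     # Lazily walk the 6k+/-1 sequence (1, 5, 7, 11, ...) instead of
--     # materialising and filtering range(limit); the sum reaches limit after
--     # O(sqrt(limit)) terms, so no O(limit) list is ever built.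
--     s = 0
--     n = 1
--     while s + n < limit:
--         s += n
--         n += 4 if n % 6 == 1 else 2
--     return s
-- ===== Notes on version B (the rewrite author's own statement) =====
-- stated objective: faster
-- what changed: Instead of building and filtering the whole range(limit) list and folding over it with a break, B lazily generates the 6k+/-1 sequence and stops as soon as the running sum would reach limit, doing O(sqrt(limit)) work.
import Mathlib
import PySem

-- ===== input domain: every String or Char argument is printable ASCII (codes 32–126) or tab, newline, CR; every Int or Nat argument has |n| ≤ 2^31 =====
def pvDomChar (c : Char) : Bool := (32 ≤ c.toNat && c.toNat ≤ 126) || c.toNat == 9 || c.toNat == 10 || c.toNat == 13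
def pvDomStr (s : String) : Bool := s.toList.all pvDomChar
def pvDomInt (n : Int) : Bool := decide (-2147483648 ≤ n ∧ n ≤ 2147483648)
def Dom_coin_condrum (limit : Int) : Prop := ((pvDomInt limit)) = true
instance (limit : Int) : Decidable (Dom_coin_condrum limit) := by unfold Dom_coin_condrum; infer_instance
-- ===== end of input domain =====

-- B replaces A's filter-whole-range-then-fold by a lazy walk of the 6k±1 sequence that stops
-- as soon as the running sum would reach limit (objective: faster, asymptotically).

-- ===== PORT A =====
-- the comprehension's filter predicate: i % 2 != 0 and i % 3 != 0
def coinPred (i : Int) : Bool := PySem.Int.mod i 2 != 0 && PySem.Int.mod i 3 != 0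

-- the for-loop with its break, step for step
def coinLoop (limit : Int) : List Int → Int → Int
  | [], current_sum => current_sum
  | number :: rest, current_sum =>
      if current_sum + number ≥ limit then current_sum
      else coinLoop limit rest (current_sum + number)

def coin_condrum (limit : Int) : Int :=
  let numbers := (PySem.List.pyRange 0 limit 1).filter coinPred
  coinLoop limit numbers 0

-- ===== PORT B =====
-- the while loop of Source B; the '1 ≤ n' conjunct only makes the recursion total
-- (it holds invariantly from the initial n = 1 and never changes the computation)
def coinWalk (limit s n : Int) : Int :=
  if h : s + n < limit ∧ 1 ≤ n then
    coinWalk limit (s + n) (n + if n % 6 == 1 then 4 else 2)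
  else s
termination_by (limit - s).toNat
decreasing_by omega

def coin_condrum_alt (limit : Int) : Int := coinWalk limit 0 1

-- ===== PRECONDITION & SPEC =====
def Spec_coin_condrum (limit : Int) (out : Int) : Prop := out = coin_condrum_alt limit
instance (limit : Int) (out : Int) : Decidable (Spec_coin_condrum limit out) := by unfold Spec_coin_condrum; infer_instance

-- ===== CLAIM (what is proved, stated in full; the proofs are below) =====
def Claim_equal_coin_condrum : Prop := ∀ (limit : Int), Dom_coin_condrum limit → Spec_coin_condrum limit (coin_condrum limit)

-- ===== LEMMAS AND PROOFS =====

theorem coinPred_iff (i : Int) : coinPred i = true ↔ (i % 2 ≠ 0 ∧ i % 3 ≠ 0) := by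
  simp [coinPred]

-- dropping one element that fails the filter does not change the filtered range
theorem filter_skip (limit m : Int) (hm : coinPred m = false) :
    (PySem.List.pyRange m limit 1).filter coinPred
      = (PySem.List.pyRange (m + 1) limit 1).filter coinPred := by
  by_cases h : m < limit
  · rw [PySem.List.pyRange_one_cons h]
    simp [List.filter, hm]
  · rw [PySem.List.pyRange_one_eq_nil (by omega), PySem.List.pyRange_one_eq_nil (by omega)]

theorem coinPred_false_of (m : Int) (h : m % 2 = 0 ∨ m % 3 = 0) : coinPred m = false := by
  rcases Bool.eq_false_or_eq_true (coinPred m) with ht | hf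
  · exact absurd ((coinPred_iff m).mp ht) (by tauto)
  · exact hf

-- peeling one 6k±1 element off the filtered range
theorem filter_step (limit n : Int) (h6 : n % 6 = 1 ∨ n % 6 = 5) (hn : n < limit) :
    (PySem.List.pyRange n limit 1).filter coinPred
      = n :: (PySem.List.pyRange (n + if n % 6 == 1 then 4 else 2) limit 1).filter coinPred := by
  rw [PySem.List.pyRange_one_cons hn]
  have hp : coinPred n = true := (coinPred_iff n).mpr (by omega)
  rcases h6 with h1 | h5
  · have e1 := filter_skip limit (n+1) (coinPred_false_of _ (by omega))
    have e2 := filter_skip limit (n+2) (coinPred_false_of _ (by omega))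
    have e3 := filter_skip limit (n+3) (coinPred_false_of _ (by omega))
    simp only [List.filter, hp, h1]
    norm_num
    rw [e1]; rw [show n+1+1 = n+2 by ring, e2, show n+2+1 = n+3 by ring, e3]
    ring_nf
  · have e1 := filter_skip limit (n+1) (coinPred_false_of _ (by omega))
    have hne : (n % 6 == 1) = false := by simp [h5]
    simp only [List.filter, hp, hne]
    norm_num
    rw [e1]; ring_nf

-- the central invariant: A's break-fold over the filtered tail equals B's lazy walk
theorem loop_eq (k : Nat) : ∀ (limit s n : Int), (limit - s).toNat ≤ k →
    0 ≤ s → 1 ≤ n → (n % 6 = 1 ∨ n % 6 = 5) →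
    coinLoop limit ((PySem.List.pyRange n limit 1).filter coinPred) s = coinWalk limit s n := by
  induction k with
  | zero =>
      intro limit s n hk hs hn h6
      have hstop : ¬ (s + n < limit) := by omega
      rw [coinWalk]
      simp only [hstop, false_and, dite_false]
      by_cases hlt : n < limit
      · rw [filter_step limit n h6 hlt]
        simp [coinLoop, show limit ≤ s + n by omega]
      · rw [PySem.List.pyRange_one_eq_nil (by omega)]; rfl
  | succ k ih =>
      intro limit s n hk hs hn h6
      rw [coinWalk]
      by_cases hc : s + n < limit
      · have hn' : n < limit := by omega
        have h6' : (n + if n % 6 == 1 then 4 else 2) % 6 = 1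
                 ∨ (n + if n % 6 == 1 then 4 else 2) % 6 = 5 := by
          rcases h6 with h1 | h5
          · right; simp [h1]; omega
          · left; have hne : (n % 6 == 1) = false := by simp [h5]
            simp [hne]; omega
        rw [filter_step limit n h6 hn', dif_pos ⟨hc, hn⟩]
        simp only [coinLoop, if_neg (show ¬ (s + n ≥ limit) by omega)]
        exact ih limit (s + n) _ (by omega) (by omega) (by split <;> omega) h6'
      · simp only [hc, false_and, dite_false]
        by_cases hlt : n < limit
        · rw [filter_step limit n h6 hlt]
          simp [coinLoop, show limit ≤ s + n by omega]
        · rw [PySem.List.pyRange_one_eq_nil (by omega)]; rfl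

-- ===== VERDICT (by name: the statement is the Claim_ definition above) =====
theorem coin_condrum_spec : Claim_equal_coin_condrum := by
  intro limit _
  show coin_condrum limit = coin_condrum_alt limit
  unfold coin_condrum coin_condrum_alt
  rw [filter_skip limit 0 (coinPred_false_of 0 (by omega))]
  exact loop_eq (limit - 0).toNat limit 0 1 (le_refl _) (by omega) (by omega) (by omega)
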